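-- pv_equiv track=rewrite | github.com/JuliaRayskaya/PythonD | venv/script_names.py | f
-- ===== SOURCE A (Python) =====
-- def f(lst):
--     dct = {}
--     for x in lst:
--         if x['id'] in dct:
--             dct[x['id']] += x['text']
--         else:
--             dct[x['id']] = x['text']
--     return [{'id': x, 'text': y} for x, y in dct.items()]
-- ===== SOURCE B (Python) =====
-- def f(lst):
--     ids = []
--     for x in lst:
--         if x['id'] not in ids:
--             ids.append(x['id'])
--     out = []
--     for i in ids:
--         text = ''
--         for x in lst:
--             if x['id'] == i:
--                 text += x['text']
--         out.append({'id': i, 'text': text})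
--     return out
-- ===== Notes on version B (the rewrite author's own statement) =====
-- stated objective: alternative
-- what changed: Replaces the single-pass dict grouping with a two-phase shape: first collect the distinct ids in first-appearance order by list scan, then re-scan the whole input once per id, accumulating that id's texts with string concatenation; no dict is used.
import Mathlib
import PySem

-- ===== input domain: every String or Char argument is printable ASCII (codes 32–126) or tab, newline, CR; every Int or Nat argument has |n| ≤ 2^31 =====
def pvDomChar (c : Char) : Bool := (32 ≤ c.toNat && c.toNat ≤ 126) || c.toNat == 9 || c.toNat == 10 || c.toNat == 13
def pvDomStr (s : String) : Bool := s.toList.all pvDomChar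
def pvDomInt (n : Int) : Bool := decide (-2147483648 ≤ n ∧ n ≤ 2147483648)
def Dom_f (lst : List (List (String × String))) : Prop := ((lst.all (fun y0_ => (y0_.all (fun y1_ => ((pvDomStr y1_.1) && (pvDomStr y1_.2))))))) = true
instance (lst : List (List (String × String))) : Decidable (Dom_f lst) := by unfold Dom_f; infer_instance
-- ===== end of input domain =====

-- B replaces A's single-pass dict grouping by collect-distinct-ids-then-rescan-per-id (alternative decomposition, no dict); equivalence of return values is proved on inputs where every entry has 'id' and 'text' keys.

-- ===== PORT A =====
-- x['id'] / x['text'] on the input dict x (an association list; Python-dict lookup = value of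
-- the last binding, which is what Dict.ofList's overwriting insert yields). Exact on Pre_f
-- (both keys present); the default "" is never reached there.
def pvId (x : List (String × String)) : String := (PySem.Dict.ofList x).getD "id" ""
def pvText (x : List (String × String)) : String := (PySem.Dict.ofList x).getD "text" ""

def f (lst : List (List (String × String))) : List (List (String × String)) :=
  let dct : PySem.Dict String String := lst.foldl (fun d x =>
    if d.contains (pvId x) then d.insert (pvId x) (d.getD (pvId x) "" ++ pvText x)
    else d.insert (pvId x) (pvText x)) PySem.Dict.empty
  dct.items.map (fun p => [("id", p.1), ("text", p.2)])

-- ===== PORT B =====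
def f_alt (lst : List (List (String × String))) : List (List (String × String)) :=
  let ids : List String := lst.foldl (fun acc x =>
    if acc.contains (pvId x) then acc else acc ++ [pvId x]) []
  ids.map (fun i =>
    [("id", i), ("text", lst.foldl (fun t x => if pvId x == i then t ++ pvText x else t) "")])

-- ===== PRECONDITION & SPEC =====
-- Pre_f: every entry carries both an 'id' and a 'text' key — on any other entry the Python A
-- (and B) raises KeyError.
def Pre_f (lst : List (List (String × String))) : Prop :=
  ∀ x ∈ lst, "id" ∈ x.map Prod.fst ∧ "text" ∈ x.map Prod.fst
instance (lst : List (List (String × String))) : Decidable (Pre_f lst) := by unfold Pre_f; infer_instance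
def pvWitness_f : (List (List (String × String))) :=
  [[("id", "a"), ("text", "x")], [("id", "b"), ("text", "y")], [("id", "a"), ("text", "z")]]

def Spec_f (lst : List (List (String × String))) (out : List (List (String × String))) : Prop := out = f_alt lst
instance (lst : List (List (String × String))) (out : List (List (String × String))) : Decidable (Spec_f lst out) := by unfold Spec_f; infer_instance

-- ===== CLAIM (what is proved, stated in full; the proofs are below) =====
def Claim_equal_f : Prop := ∀ (lst : List (List (String × String))), Dom_f lst → Pre_f lst → Spec_f lst (f lst)

-- ===== LEMMAS AND PROOFS =====

-- A's two insert branches are one insert whose value is B's inner-loop step.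
lemma stepA_eq (d : PySem.Dict String String) (x : List (String × String)) :
    (if d.contains (pvId x) then d.insert (pvId x) (d.getD (pvId x) "" ++ pvText x)
     else d.insert (pvId x) (pvText x))
    = d.insert (pvId x) (d.getD (pvId x) "" ++ pvText x) := by
  by_cases h : d.contains (pvId x) = true
  · simp [h]
  · rw [if_neg h, PySem.Dict.getD_of_not_contains d "" (by simpa using h)]
    simp

-- the per-key value of A's grouping dict IS B's inner accumulation loop
lemma getD_fold (l : List (List (String × String))) (d : PySem.Dict String String) (k : String) :
    (l.foldl (fun d x => d.insert (pvId x) (d.getD (pvId x) "" ++ pvText x)) d).getD k ""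
    = l.foldl (fun t x => if pvId x == k then t ++ pvText x else t) (d.getD k "") := by
  induction l generalizing d with
  | nil => rfl
  | cons x l ih =>
    simp only [List.foldl_cons, ih, PySem.Dict.getD_insert]
    by_cases h : pvId x = k
    · simp [h]
    · simp [h, Ne.symm h]

-- ===== VERDICT (by name: the statement is the Claim_ definition above) =====
theorem f_spec : Claim_equal_f := by
  intro lst _ _
  unfold Spec_f f f_alt
  simp only [funext fun d => funext fun x => stepA_eq d x]
  rw [PySem.Dict.items_eq_map_keys _ (PySem.Dict.nodup_keys_foldl_insert_key lst pvId _ _ PySem.Dict.nodup_keys_empty) ""]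
  rw [PySem.Dict.keys_foldl_insert_key]
  have hkeys : (PySem.Dict.empty (κ := String) (ν := String)).keys = [] := rfl
  rw [hkeys, PySem.Set.update_nil_left, ← PySem.Set.update_nil_left,
      PySem.Set.update_map_eq_foldl_add]
  have hadd : (fun (s : PySem.Set String) (b : List (String × String)) => s.add (pvId b))
      = fun acc x => if acc.contains (pvId x) then acc else acc ++ [pvId x] := rfl
  rw [hadd]
  rw [List.map_map]
  refine List.map_congr_left fun i _ => ?_
  simp only [Function.comp]
  rw [getD_fold, PySem.Dict.getD_empty]
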